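-- pv_equiv track=rewrite | github.com/fick1udd/try_box | self_powers.py | sum_of_self_powers
-- ===== SOURCE A (Python) =====
-- def rel_int_to_str(n, digs):
--     """
--     convert numbers in n to string digits in a list
--
--     :param n: integer to be converted to single digit numbers in string format
--     :type n: int
--     :param digs: integer representing the number of digits that are relevant and therefore converted
--     :type digs: int
--     :return: list of digs number of single digit numbers in string format
--     :rtype: list
--     """
--
--     nstr = []
--     for i in range(0, digs):
--         dign = n % 10
--         if n > 0:
--             nstr.append(str(dign))
--         n //= 10
--
--     nstr.reverse()
--     return nstr
--
-- def multiply_two_numbers(n, m, dgs):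
--     """
--
--     :param n: number to be multiplied with m
--     :type n: integer
--     :param m: number to be multiplied with n
--     :type m: integer
--     :param dgs: integer representing the number of digits that are relevant starting from the smallest.
--     :type dgs: integer
--     :return: result from multiplying n and m
--     :rtype: integer
--     """
--     ns = rel_int_to_str(n, dgs)
--     ms = rel_int_to_str(m, dgs)
--     dig = dgs + 1
--     res = 0
--     counter = -1
--     for i in range(dig - 1, -1, -1):
--         if i < len(ns):
--             temp4 = 0
--             for j in range(dig - 1, -1, -1):
--                 if j < len(ms) and dig > len(ms) + counter - j:
--                     temp1 = int(ns[i]) * int(ms[j])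
--                     temp2 = 10 ** (len(ms) + counter - j)
--                     temp3 = temp1 * temp2
--                     temp4 += temp3
--
--             res += temp4
--             counter += 1
--
--     return res
--
-- def run_multiply_n_times(n, digits):
--     #  returns the last digits of  n ** n
--     counter = 1
--     number = n
--     b_trunc = number
--     while counter < n:
--         b_trunc = multiply_two_numbers(number, b_trunc, digits)
--         counter += 1
--
--     b_t = rel_int_to_str(b_trunc, digits)
--     b_t.reverse()
--     b_trunc = 0
--     for i in range(len(b_t)):
--         b_trunc += int(b_t[i]) * 10 ** i
--     return b_trunc
--
-- def sum_of_self_powers(number, digits):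
--     # sums up number ** number for number in the serie 1 to number
--
--     tot = 0
--     for n in range(1, number + 1):
--         temp = run_multiply_n_times(n, digits)
--         tot += temp
--
--     # returns relevant number of digits
--     tot_t = rel_int_to_str(tot, digits)
--     tot_t.reverse()
--     tot = 0
--     for i in range(len(tot_t)):
--         tot += int(tot_t[i]) * 10 ** i
--     return tot
-- ===== SOURCE B (Python) =====
-- def sum_of_self_powers(number, digits):
--     # sums up n ** n for n in 1..number, keeping the last `digits` decimal digits;
--     # per-term binary (square-and-multiply) modular exponentiation instead of
--     # repeated digit-list long multiplication
--     if digits <= 0: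
--         return 0
--     m = 10 ** digits
--     total = 0
--     for n in range(1, number + 1):
--         result = 1
--         base = n % m
--         e = n
--         while e > 0:
--             if e % 2 == 1:
--                 result = (result * base) % m
--             base = (base * base) % m
--             e //= 2
--         total += result
--     return total % m
-- ===== Notes on version B (the rewrite author's own statement) =====
-- stated objective: faster
-- what changed: Replaces A's per-term chain of n-1 digit-string long multiplications (each rebuilding digit lists via str/int round-trips) with direct modular arithmetic: each n**n mod 10**digits is computed by binary square-and-multiply, and the running total is reduced once at the end.
import Mathlib
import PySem

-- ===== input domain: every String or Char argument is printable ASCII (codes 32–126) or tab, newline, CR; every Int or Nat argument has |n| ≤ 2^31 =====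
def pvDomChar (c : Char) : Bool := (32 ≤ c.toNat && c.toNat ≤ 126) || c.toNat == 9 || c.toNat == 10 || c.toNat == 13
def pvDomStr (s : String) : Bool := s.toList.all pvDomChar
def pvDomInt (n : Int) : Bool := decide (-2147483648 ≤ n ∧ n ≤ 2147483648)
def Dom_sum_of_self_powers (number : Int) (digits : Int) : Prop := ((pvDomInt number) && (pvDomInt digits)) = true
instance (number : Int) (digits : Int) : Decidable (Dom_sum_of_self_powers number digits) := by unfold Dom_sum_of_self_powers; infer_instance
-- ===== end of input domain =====

-- B replaces A's chain of digit-string long multiplications with per-term binary modular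
-- exponentiation mod 10^digits (faster); return values proved equal for all inputs.


-- ===== PORT A =====
-- rel_int_to_str: collects the digit strings of n (least significant appended first), then reverses
def relIntToStr (n : Int) (digs : Int) : List String :=
  let st := (PySem.List.pyRange 0 digs 1).foldl
    (fun (st : List String × Int) _ =>
      let dign := PySem.Int.mod st.2 10
      let nstr := if st.2 > 0 then st.1 ++ [PySem.Int.toStr dign] else st.1
      (nstr, PySem.Int.floordiv st.2 10)) ([], n)
  st.1.reverse

-- multiply_two_numbers; ns[i]/ms[j] are read via pyGetD (the guards i < len(ns), j < len(ms)
-- keep the indices in range, so the "" defaults are unreachable); under the guard the exponent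
-- len(ms)+counter-j is nonnegative, so 10 ** e is ported as 10 ^ e.toNat; int(s) is ported as
-- ofStr? with an unreachable default 0 (the entries are str(digit)).
def multiplyTwoNumbers (n m dgs : Int) : Int :=
  let ns := relIntToStr n dgs
  let ms := relIntToStr m dgs
  let dig := dgs + 1
  let st := (PySem.List.pyRange (dig - 1) (-1) (-1)).foldl
    (fun (st : Int × Int) i =>
      if i < (ns.length : Int) then
        let temp4 := (PySem.List.pyRange (dig - 1) (-1) (-1)).foldl
          (fun temp4 j =>
            if j < (ms.length : Int) ∧ dig > (ms.length : Int) + st.2 - j then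
              let temp1 := ((PySem.Int.ofStr? (PySem.List.pyGetD ns i "")).getD 0) *
                           ((PySem.Int.ofStr? (PySem.List.pyGetD ms j "")).getD 0)
              let temp2 := (10 : Int) ^ ((ms.length : Int) + st.2 - j).toNat
              temp4 + temp1 * temp2
            else temp4) 0
        (st.1 + temp4, st.2 + 1)
      else st) (0, -1)
  st.1

-- the while loop 'counter = 1; while counter < n: …; counter += 1' runs (n-1).toNat times
def rmLoop (number digits : Int) : Nat → Int → Int
  | 0, b => b
  | k + 1, b => rmLoop number digits k (multiplyTwoNumbers number b digits)

def runMultiplyNTimes (n digits : Int) : Int :=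
  let bTrunc := rmLoop n digits (n - 1).toNat n
  let bT := (relIntToStr bTrunc digits).reverse
  (PySem.List.pyRange 0 (bT.length : Int) 1).foldl
    (fun acc i => acc + ((PySem.Int.ofStr? (PySem.List.pyGetD bT i "")).getD 0) * 10 ^ i.toNat) 0

def sum_of_self_powers (number : Int) (digits : Int) : Int :=
  let tot := (PySem.List.pyRange 1 (number + 1) 1).foldl
    (fun tot n => tot + runMultiplyNTimes n digits) 0
  let totT := (relIntToStr tot digits).reverse
  (PySem.List.pyRange 0 (totT.length : Int) 1).foldl
    (fun acc i => acc + ((PySem.Int.ofStr? (PySem.List.pyGetD totT i "")).getD 0) * 10 ^ i.toNat) 0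

-- ===== PORT B =====
-- the while loop halves e each pass, so fuel n.toNat (e starts at n, and e//2 < e) suffices
def powLoop (m : Int) : Nat → Int → Int → Int → Int
  | 0, result, _, _ => result
  | f + 1, result, base, e =>
    if e > 0 then
      powLoop m f (if PySem.Int.mod e 2 = 1 then PySem.Int.mod (result * base) m else result)
        (PySem.Int.mod (base * base) m) (PySem.Int.floordiv e 2)
    else result

def sum_of_self_powers_alt (number : Int) (digits : Int) : Int :=
  if digits ≤ 0 then 0
  else
    let m := (10 : Int) ^ digits.toNat  -- 10 ** digits with digits > 0
    let total := (PySem.List.pyRange 1 (number + 1) 1).foldl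
      (fun total n => total + powLoop m n.toNat 1 (PySem.Int.mod n m) n) 0
    PySem.Int.mod total m

-- ===== PRECONDITION & SPEC =====
def Spec_sum_of_self_powers (number : Int) (digits : Int) (out : Int) : Prop := out = sum_of_self_powers_alt number digits
instance (number : Int) (digits : Int) (out : Int) : Decidable (Spec_sum_of_self_powers number digits out) := by unfold Spec_sum_of_self_powers; infer_instance

-- ===== CLAIM (what is proved, stated in full; the proofs are below) =====
def Claim_equal_sum_of_self_powers : Prop := ∀ (number : Int) (digits : Int), Dom_sum_of_self_powers number digits → Spec_sum_of_self_powers number digits (sum_of_self_powers number digits)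

-- ===== LEMMAS AND PROOFS =====

-- the mathematical digit list of a (LSB first), cut off at k digits
def digitsNum : Int → Nat → List Int
  | _, 0 => []
  | a, k + 1 => if 0 < a then (a % 10) :: digitsNum (a / 10) k else []

-- numeric value of a digit list, as the indexed sum A's reconstruction loops compute
def sumVal (zs : List Int) : Int := ∑ k ∈ Finset.range zs.length, zs.getD k 0 * 10 ^ k

theorem digitsNum_length_le (k : Nat) : ∀ a : Int, (digitsNum a k).length ≤ k := by
  induction k with
  | zero => intro a; simp [digitsNum]
  | succ k ih =>
    intro a
    simp only [digitsNum]
    split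
    · simpa using ih (a / 10)
    · simp

theorem digitsNum_mem_bounds (k : Nat) : ∀ a d : Int, d ∈ digitsNum a k → 0 ≤ d ∧ d < 10 := by
  induction k with
  | zero => intro a d h; simp [digitsNum] at h
  | succ k ih =>
    intro a d h
    simp only [digitsNum] at h
    split at h
    · rcases List.mem_cons.mp h with h | h
      · subst h
        exact ⟨Int.emod_nonneg a (by norm_num), Int.emod_lt_of_pos a (by norm_num)⟩
      · exact ih _ _ h
    · simp at h

theorem ofStr_toStr_digit (d : Int) (h0 : 0 ≤ d) (h1 : d < 10) :
    PySem.Int.ofStr? (PySem.Int.toStr d) = some d := by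
  interval_cases d <;> decide

theorem emod_ten_pow_succ (q r : Int) (hr0 : 0 ≤ r) (hr : r < 10) (K : Nat) :
    (10 * q + r) % 10 ^ (K + 1) = q % 10 ^ K * 10 + r := by
  have hP : (0:Int) < 10 ^ K := by positivity
  have hdm : (10:Int) ^ K * (q / 10 ^ K) + q % 10 ^ K = q := Int.mul_ediv_add_emod q (10 ^ K)
  have hs0 : 0 ≤ q % 10 ^ K := Int.emod_nonneg q (by positivity)
  have hs1 : q % 10 ^ K < 10 ^ K := Int.emod_lt_of_pos q hP
  have key : 10 * q + r = (q % 10 ^ K * 10 + r) + 10 ^ (K + 1) * (q / 10 ^ K) := by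
    rw [pow_succ]; nlinarith [hdm]
  rw [key, Int.add_mul_emod_self_left]
  apply Int.emod_eq_of_lt (by nlinarith) (by rw [pow_succ]; nlinarith)

theorem digitsNum_sumVal (k : Nat) : ∀ a : Int, 0 ≤ a → sumVal (digitsNum a k) = a % 10 ^ k := by
  induction k with
  | zero => intro a _; simp [digitsNum, sumVal]
  | succ k ih =>
    intro a ha
    by_cases hpos : 0 < a
    · have hq : 0 ≤ a / 10 := Int.ediv_nonneg ha (by norm_num)
      have ihq := ih (a / 10) hq
      simp only [digitsNum, if_pos hpos, sumVal, List.length_cons]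
      rw [Finset.sum_range_succ']
      simp only [List.getD_cons_succ, List.getD_cons_zero, pow_zero, mul_one]
      have : ∑ x ∈ Finset.range (digitsNum (a / 10) k).length,
          (digitsNum (a / 10) k).getD x 0 * 10 ^ (x + 1)
          = (∑ x ∈ Finset.range (digitsNum (a / 10) k).length,
              (digitsNum (a / 10) k).getD x 0 * 10 ^ x) * 10 := by
        rw [Finset.sum_mul]
        exact Finset.sum_congr rfl (fun x _ => by ring)
      rw [this]
      have hrec : a = 10 * (a / 10) + a % 10 := by omega
      conv_rhs => rw [hrec]
      rw [emod_ten_pow_succ (a / 10) (a % 10) (Int.emod_nonneg a (by norm_num))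
        (Int.emod_lt_of_pos a (by norm_num)) k]
      rw [sumVal] at ihq
      rw [ihq]
    · have ha0 : a = 0 := by omega
      subst ha0
      simp [digitsNum, sumVal]

theorem relLoop_fst (l : List Int) : ∀ (acc : List String) (a : Int), 0 ≤ a →
    (l.foldl (fun (st : List String × Int) _ =>
      (if st.2 > 0 then st.1 ++ [PySem.Int.toStr (PySem.Int.mod st.2 10)] else st.1,
        PySem.Int.floordiv st.2 10)) (acc, a)).1
    = acc ++ (digitsNum a l.length).map PySem.Int.toStr := by
  induction l with
  | nil => intro acc a _; simp [digitsNum]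
  | cons x t ih =>
    intro acc a ha
    simp only [List.foldl_cons, List.length_cons]
    by_cases hpos : a > 0
    · rw [if_pos hpos]
      rw [PySem.Int.mod_eq_emod_of_pos (by norm_num), PySem.Int.floordiv_eq_ediv_of_pos (by norm_num)]
      rw [ih _ _ (Int.ediv_nonneg ha (by norm_num))]
      simp [digitsNum, hpos]
    · rw [if_neg hpos]
      have ha0 : a = 0 := by omega
      subst ha0
      have : PySem.Int.floordiv 0 10 = 0 := by decide
      rw [this, ih acc 0 le_rfl]
      have hz : ∀ k, digitsNum 0 k = [] := by
        intro k; cases k <;> simp [digitsNum]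
      simp [hz, digitsNum]

theorem relIntToStr_eq (a digs : Int) (ha : 0 ≤ a) :
    relIntToStr a digs = ((digitsNum a digs.toNat).map PySem.Int.toStr).reverse := by
  unfold relIntToStr
  have hlen : (PySem.List.pyRange 0 digs 1).length = digs.toNat := by
    rw [PySem.List.length_pyRange_one]; simp
  have := relLoop_fst (PySem.List.pyRange 0 digs 1) [] a ha
  rw [hlen] at this
  simp only []
  rw [this]
  simp

theorem recon_fold (zs : List Int) (hb : ∀ d ∈ zs, 0 ≤ d ∧ d < 10) :
    (PySem.List.pyRange 0 ((zs.map PySem.Int.toStr).length : Int) 1).foldl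
      (fun acc i => acc + ((PySem.Int.ofStr? (PySem.List.pyGetD (zs.map PySem.Int.toStr) i "")).getD 0) * 10 ^ i.toNat) 0
    = sumVal zs := by
  rw [PySem.List.foldl_add]
  rw [PySem.List.pyRange_zero]
  rw [List.map_map]
  have hlen : ((zs.map PySem.Int.toStr).length : Int).toNat = zs.length := by simp
  rw [hlen]
  have hsum : ∀ (f : Nat → Int) (n : Nat), ((List.range n).map f).sum = ∑ i ∈ Finset.range n, f i :=
    fun f n => rfl
  rw [hsum]
  rw [sumVal]
  rw [zero_add]
  apply Finset.sum_congr rfl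
  intro k hk
  have hk' : k < zs.length := Finset.mem_range.mp hk
  simp only [Function.comp]
  have hget : PySem.List.pyGetD (zs.map PySem.Int.toStr) ((k : Int)) "" = PySem.Int.toStr (zs.getD k 0) := by
    rw [PySem.List.pyGetD_natCast]
    rw [List.getD_eq_getElem?_getD, List.getElem?_map]
    simp [List.getElem?_eq_getElem hk', List.getD_eq_getElem?_getD]
  rw [hget]
  obtain ⟨d0, d1⟩ := hb (zs.getD k 0) (by
    rw [List.getD_eq_getElem zs 0 hk']
    exact List.getElem_mem hk')
  rw [ofStr_toStr_digit _ d0 d1]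
  simp

-- A's digit-reconstruction loop returns a % 10^digits.toNat
theorem recon_eq (a digs : Int) (ha : 0 ≤ a) :
    (PySem.List.pyRange 0 (((relIntToStr a digs).reverse.length : Nat) : Int) 1).foldl
      (fun acc i => acc + ((PySem.Int.ofStr? (PySem.List.pyGetD (relIntToStr a digs).reverse i "")).getD 0) * 10 ^ i.toNat) 0
    = a % 10 ^ digs.toNat := by
  have hrev : (relIntToStr a digs).reverse = (digitsNum a digs.toNat).map PySem.Int.toStr := by
    rw [relIntToStr_eq a digs ha, List.reverse_reverse]
  rw [hrev, recon_fold _ (digitsNum_mem_bounds digs.toNat a),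
    digitsNum_sumVal digs.toNat a ha]


def innerS (ns ms : List String) (dig c i : Int) : Int :=
  (PySem.List.pyRange (dig - 1) (-1) (-1)).foldl
    (fun temp4 j =>
      if j < (ms.length : Int) ∧ dig > (ms.length : Int) + c - j then
        let temp1 := ((PySem.Int.ofStr? (PySem.List.pyGetD ns i "")).getD 0) *
                     ((PySem.Int.ofStr? (PySem.List.pyGetD ms j "")).getD 0)
        let temp2 := (10 : Int) ^ ((ms.length : Int) + c - j).toNat
        temp4 + temp1 * temp2
      else temp4) 0

def Tsum (G : Int → Int → Int) : Nat → Int → Int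
  | 0, _ => 0
  | p + 1, c => G c (p : Int) + Tsum G p (c + 1)

theorem multiplyTwoNumbers_as_fold (n m dgs : Int) :
    multiplyTwoNumbers n m dgs =
      ((PySem.List.pyRange (dgs + 1 - 1) (-1) (-1)).foldl
        (fun (st : Int × Int) i =>
          if i < (((relIntToStr n dgs).length : Nat) : Int) then
            (st.1 + innerS (relIntToStr n dgs) (relIntToStr m dgs) (dgs + 1) st.2 i, st.2 + 1)
          else st) (0, -1)).1 := rfl

theorem foldl_skip {F : Int × Int → Int → Int × Int} (P' : Int) :
    ∀ (l : List Int), (∀ i ∈ l, ¬ i < P') → ∀ (st : Int × Int),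
    l.foldl (fun st i => if i < P' then F st i else st) st = st := by
  intro l
  induction l with
  | nil => intro _ st; rfl
  | cons x t ih =>
    intro h st
    simp only [List.foldl_cons, if_neg (h x (List.mem_cons_self))]
    exact ih (fun i hi => h i (List.mem_cons_of_mem x hi)) st

theorem foldl_run (G : Int → Int → Int) (P' : Int) :
    ∀ (p : Nat), (p : Int) ≤ P' → ∀ (res c : Int),
    (PySem.List.pyRange ((p : Int) - 1) (-1) (-1)).foldl
      (fun (st : Int × Int) i => if i < P' then (st.1 + G st.2 i, st.2 + 1) else st) (res, c)
    = (res + Tsum G p c, c + p) := by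
  intro p
  induction p with
  | zero =>
    intro _ res c
    rw [PySem.List.pyRange_neg_one_eq_nil (by norm_num)]
    simp [Tsum]
  | succ p ih =>
    intro hp res c
    have hcast : ((p : Int) + 1) - 1 = (p : Int) := by ring
    rw [show (((p + 1 : Nat) : Int) - 1) = (p : Int) by push_cast; ring]
    rw [PySem.List.pyRange_neg_one_cons (by omega)]
    simp only [List.foldl_cons]
    rw [if_pos (by omega), show (p:Int) - 1 = (p:Int) - 1 from rfl]
    rw [ih (by omega) (res + G c p) (c + 1)]
    simp only [Tsum]
    refine Prod.ext ?_ ?_ <;> push_cast <;> ring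

theorem getRev (zs : List Int) (i : Int) (h0 : 0 ≤ i) (h1 : i < (zs.length : Int)) :
    PySem.List.pyGetD ((zs.map PySem.Int.toStr).reverse) i "" =
      PySem.Int.toStr (zs.getD (zs.length - 1 - i.toNat) 0) := by
  have hlen : ((zs.map PySem.Int.toStr).reverse).length = zs.length := by simp
  have hi : i.toNat < zs.length := by omega
  rw [PySem.List.pyGetD_eq_getElem _ _ h0 (by omega)]
  rw [List.getElem_reverse]
  rw [List.getElem_map]
  rw [List.getD_eq_getElem zs 0 (by omega)]
  congr 1
  simp

theorem foldl_guard_add (C : Int → Prop) [DecidablePred C] (f : Int → Int) (l : List Int) (a : Int) :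
    l.foldl (fun acc j => if C j then acc + f j else acc) a
      = a + (l.map (fun j => if C j then f j else 0)).sum := by
  have : (fun (acc : Int) j => if C j then acc + f j else acc)
      = (fun acc j => acc + (if C j then f j else 0)) := by
    funext acc j; split <;> simp
  rw [this, PySem.List.foldl_add]

theorem innerS_eq (ns ms : List String) (dig c i : Int) :
    innerS ns ms dig c i =
      ((PySem.List.pyRange (dig - 1) (-1) (-1)).map
        (fun j => if (j < (ms.length : Int) ∧ dig > (ms.length : Int) + c - j) then
            (((PySem.Int.ofStr? (PySem.List.pyGetD ns i "")).getD 0) *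
             ((PySem.Int.ofStr? (PySem.List.pyGetD ms j "")).getD 0)) *
            (10 : Int) ^ ((ms.length : Int) + c - j).toNat
          else 0)).sum := by
  have h := foldl_guard_add
    (fun j => j < (ms.length : Int) ∧ dig > (ms.length : Int) + c - j)
    (fun j => (((PySem.Int.ofStr? (PySem.List.pyGetD ns i "")).getD 0) *
               ((PySem.Int.ofStr? (PySem.List.pyGetD ms j "")).getD 0)) *
              (10 : Int) ^ ((ms.length : Int) + c - j).toNat)
    (PySem.List.pyRange (dig - 1) (-1) (-1)) 0
  simpa [innerS] using h

theorem innerS_spec (zs ws : List Int) (dgs : Int) (hdgs : 0 ≤ dgs)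
    (hbz : ∀ d ∈ zs, 0 ≤ d ∧ d < 10) (hbw : ∀ d ∈ ws, 0 ≤ d ∧ d < 10)
    (_hP : zs.length ≤ dgs.toNat) (hL : ws.length ≤ dgs.toNat)
    (k : Nat) (hk : k < zs.length) :
    0 ≤ innerS ((zs.map PySem.Int.toStr).reverse) ((ws.map PySem.Int.toStr).reverse)
        (dgs + 1) ((k : Int) - 1) ((zs.length : Int) - 1 - k) ∧
    innerS ((zs.map PySem.Int.toStr).reverse) ((ws.map PySem.Int.toStr).reverse)
        (dgs + 1) ((k : Int) - 1) ((zs.length : Int) - 1 - k)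
      ≡ zs.getD k 0 * 10 ^ k * sumVal ws [ZMOD (10 : Int) ^ dgs.toNat] := by
  set D := dgs.toNat with hD
  set P := zs.length with hPdef
  set L := ws.length with hLdef
  set F : Nat → Int := fun l => if k + l ≤ D then zs.getD k 0 * ws.getD l 0 * 10 ^ (k + l) else 0
    with hF
  have hzk : 0 ≤ zs.getD k 0 ∧ zs.getD k 0 < 10 := by
    apply hbz
    rw [List.getD_eq_getElem zs 0 hk]
    exact List.getElem_mem hk
  -- reduce innerS to ∑ l < L, F l
  have main : innerS ((zs.map PySem.Int.toStr).reverse) ((ws.map PySem.Int.toStr).reverse)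
      (dgs + 1) ((k : Int) - 1) ((P : Int) - 1 - k) = ∑ l ∈ Finset.range L, F l := by
    rw [innerS_eq]
    rw [PySem.List.pyRange_neg_one_eq_reverse]
    rw [show (-1 : Int) + 1 = 0 by ring, show dgs + 1 - 1 + 1 = dgs + 1 by ring]
    rw [List.map_reverse, List.sum_reverse]
    rw [PySem.List.pyRange_zero]
    rw [List.map_map]
    have hdig : (dgs + 1).toNat = D + 1 := by omega
    rw [hdig]
    have hsum : ∀ (f : Nat → Int) (n : Nat), ((List.range n).map f).sum = ∑ i ∈ Finset.range n, f i :=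
      fun f n => rfl
    rw [hsum]
    have hx : ((PySem.Int.ofStr? (PySem.List.pyGetD ((zs.map PySem.Int.toStr).reverse)
        ((P : Int) - 1 - k) "")).getD 0) = zs.getD k 0 := by
      rw [getRev zs _ (by omega) (by omega)]
      rw [show ((P : Int) - 1 - k).toNat = P - 1 - k by omega]
      rw [show P - 1 - (P - 1 - k) = k by omega]
      rw [ofStr_toStr_digit _ hzk.1 hzk.2]
      rfl
    have step : ∀ t ∈ Finset.range (D + 1),
        (if (((t : Nat) : Int) < (((ws.map PySem.Int.toStr).reverse).length : Int) ∧
              dgs + 1 > (((ws.map PySem.Int.toStr).reverse).length : Int) + ((k : Int) - 1) - ((t : Nat) : Int)) then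
            (((PySem.Int.ofStr? (PySem.List.pyGetD ((zs.map PySem.Int.toStr).reverse)
                ((P : Int) - 1 - k) "")).getD 0) *
             ((PySem.Int.ofStr? (PySem.List.pyGetD ((ws.map PySem.Int.toStr).reverse) ((t : Nat) : Int) "")).getD 0)) *
            (10 : Int) ^ ((((ws.map PySem.Int.toStr).reverse).length : Int) + ((k : Int) - 1) - ((t : Nat) : Int)).toNat
          else 0)
        = if t < L then F (L - 1 - t) else 0 := by
      intro t _
      simp only [List.length_reverse, List.length_map, ← hLdef]
      by_cases htL : t < L
      · have hy : ((PySem.Int.ofStr? (PySem.List.pyGetD ((ws.map PySem.Int.toStr).reverse)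
            ((t : Nat) : Int) "")).getD 0) = ws.getD (L - 1 - t) 0 := by
          rw [getRev ws _ (by omega) (by exact_mod_cast htL)]
          rw [show ((t : Nat) : Int).toNat = t by omega]
          have hbwt : 0 ≤ ws.getD (L - 1 - t) 0 ∧ ws.getD (L - 1 - t) 0 < 10 := by
            apply hbw
            rw [List.getD_eq_getElem ws 0 (by omega)]
            exact List.getElem_mem (by omega)
          rw [ofStr_toStr_digit _ hbwt.1 hbwt.2]
          rfl
        rw [hx, hy]
        have hcond1 : ((t : Nat) : Int) < (L : Int) := by exact_mod_cast htL
        rw [if_pos htL, hF]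
        dsimp only
        by_cases hcond2 : k + (L - 1 - t) ≤ D
        · rw [if_pos ⟨hcond1, by omega⟩, if_pos hcond2]
          have hexp : ((L : Int) + ((k : Int) - 1) - ((t : Nat) : Int)).toNat = k + (L - 1 - t) := by
            omega
          rw [hexp]
        · rw [if_neg (by omega), if_neg hcond2]
      · rw [if_neg (by omega), if_neg htL]
    simp only [Function.comp]
    rw [Finset.sum_congr rfl step]
    have hsub : Finset.range L ⊆ Finset.range (D + 1) := by
      intro x hx
      simp only [Finset.mem_range] at *
      omega
    rw [← Finset.sum_subset (f := fun t => if t < L then F (L - 1 - t) else 0) hsub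
      (fun x _ hnx => by
        beta_reduce
        rw [if_neg (by simp only [Finset.mem_range] at hnx; omega)])]
    rw [Finset.sum_congr rfl (fun t ht => if_pos (Finset.mem_range.mp ht))]
    exact Finset.sum_range_reflect F L
  constructor
  · rw [main]
    apply Finset.sum_nonneg
    intro l hl
    rw [hF]
    dsimp only
    split
    · have hwl : 0 ≤ ws.getD l 0 := by
        refine (hbw _ ?_).1
        rw [List.getD_eq_getElem ws 0 (Finset.mem_range.mp hl)]
        exact List.getElem_mem (Finset.mem_range.mp hl)
      exact mul_nonneg (mul_nonneg hzk.1 hwl) (by positivity)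
    · exact le_rfl
  · rw [main]
    have hcong : (∑ l ∈ Finset.range L, F l)
        ≡ ∑ l ∈ Finset.range L, zs.getD k 0 * ws.getD l 0 * 10 ^ (k + l)
          [ZMOD (10 : Int) ^ D] := by
      rw [Int.modEq_iff_dvd, ← Finset.sum_sub_distrib]
      apply Finset.dvd_sum
      intro l _
      rw [hF]
      dsimp only
      split
      · simp
      · rename_i hcond
        have : (10 : Int) ^ D ∣ 10 ^ (k + l) := pow_dvd_pow 10 (by omega)
        simpa using Dvd.dvd.mul_left this (zs.getD k 0 * ws.getD l 0)
    have hprod : ∑ l ∈ Finset.range L, zs.getD k 0 * ws.getD l 0 * 10 ^ (k + l)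
        = zs.getD k 0 * 10 ^ k * sumVal ws := by
      rw [sumVal, Finset.mul_sum]
      apply Finset.sum_congr rfl
      intro l _
      rw [pow_add]
      ring
    rw [← hprod]
    exact hcong

theorem Tsum_spec (zs ws : List Int) (dgs : Int) (hdgs : 0 ≤ dgs)
    (hbz : ∀ d ∈ zs, 0 ≤ d ∧ d < 10) (hbw : ∀ d ∈ ws, 0 ≤ d ∧ d < 10)
    (hP : zs.length ≤ dgs.toNat) (hL : ws.length ≤ dgs.toNat) :
    ∀ p : Nat, p ≤ zs.length →
      0 ≤ Tsum (innerS ((zs.map PySem.Int.toStr).reverse) ((ws.map PySem.Int.toStr).reverse) (dgs + 1))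
            p ((zs.length : Int) - 1 - p) ∧
      Tsum (innerS ((zs.map PySem.Int.toStr).reverse) ((ws.map PySem.Int.toStr).reverse) (dgs + 1))
            p ((zs.length : Int) - 1 - p)
        ≡ (∑ t ∈ Finset.range p, zs.getD (zs.length - p + t) 0 * 10 ^ (zs.length - p + t)) * sumVal ws
          [ZMOD (10 : Int) ^ dgs.toNat] := by
  intro p
  induction p with
  | zero => intro _; simp [Tsum, Int.ModEq.refl]
  | succ p ih =>
    intro hp
    set P := zs.length with hPdef
    set G := innerS ((zs.map PySem.Int.toStr).reverse) ((ws.map PySem.Int.toStr).reverse) (dgs + 1)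
      with hG
    set k := P - 1 - p with hkdef
    have hkP : k < P := by omega
    obtain ⟨i0, i1⟩ := innerS_spec zs ws dgs hdgs hbz hbw hP hL k hkP
    obtain ⟨t0, t1⟩ := ih (by omega)
    have harg1 : (P : Int) - 1 - ((p + 1 : Nat) : Int) = ((k : Nat) : Int) - 1 := by push_cast; omega
    have harg2 : ((p : Nat) : Int) = (P : Int) - 1 - ((k : Nat) : Int) := by omega
    have hTsucc : Tsum G (p + 1) ((P : Int) - 1 - ((p + 1 : Nat) : Int))
        = G (((k : Nat) : Int) - 1) ((P : Int) - 1 - ((k : Nat) : Int)) + Tsum G p ((P : Int) - 1 - ((p : Nat) : Int)) := by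
      show G ((P : Int) - 1 - ((p + 1 : Nat) : Int)) ((p : Nat) : Int)
          + Tsum G p ((P : Int) - 1 - ((p + 1 : Nat) : Int) + 1) = _
      rw [harg1, harg2]
      have harg3 : ((k : Nat) : Int) - 1 + 1 = (P : Int) - 1 - ((p : Nat) : Int) := by omega
      have harg4 : (P : Int) - 1 - ((P : Int) - 1 - ((k : Nat) : Int)) = (P : Int) - 1 - ((p : Nat) : Int) := by
        omega
      rw [harg3, harg4]
    rw [hTsucc]
    constructor
    · exact add_nonneg i0 t0
    · have hsum : ∑ t ∈ Finset.range (p + 1), zs.getD (P - (p + 1) + t) 0 * 10 ^ (P - (p + 1) + t)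
          = zs.getD k 0 * 10 ^ k + ∑ t ∈ Finset.range p, zs.getD (P - p + t) 0 * 10 ^ (P - p + t) := by
        rw [Finset.sum_range_succ']
        rw [show P - (p + 1) + 0 = k by omega]
        rw [add_comm]
        congr 1
        apply Finset.sum_congr rfl
        intro t _
        rw [show P - (p + 1) + (t + 1) = P - p + t by omega]
      rw [hsum, add_mul]
      exact Int.ModEq.add i1 t1

theorem multiplyTwoNumbers_spec (n m dgs : Int) (hn : 0 ≤ n) (hm : 0 ≤ m) :
    0 ≤ multiplyTwoNumbers n m dgs ∧
      multiplyTwoNumbers n m dgs ≡ n * m [ZMOD (10 : Int) ^ dgs.toNat] := by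
  by_cases hdgs : 0 ≤ dgs
  · set zs := digitsNum n dgs.toNat with hzs
    set ws := digitsNum m dgs.toNat with hws
    set P := zs.length with hPdef
    have hbz := digitsNum_mem_bounds dgs.toNat n
    have hbw := digitsNum_mem_bounds dgs.toNat m
    have hPle : P ≤ dgs.toNat := digitsNum_length_le dgs.toNat n
    have hLle : ws.length ≤ dgs.toNat := digitsNum_length_le dgs.toNat m
    have hval : multiplyTwoNumbers n m dgs
        = Tsum (innerS ((zs.map PySem.Int.toStr).reverse) ((ws.map PySem.Int.toStr).reverse) (dgs + 1))
            P (-1) := by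
      rw [multiplyTwoNumbers_as_fold]
      rw [relIntToStr_eq n dgs hn, relIntToStr_eq m dgs hm]
      simp only [List.length_reverse, List.length_map, ← hzs, ← hws, ← hPdef]
      have hr1 : PySem.List.pyRange (dgs + 1 - 1) (-1) (-1)
          = (PySem.List.pyRange (P : Int) (dgs + 1) 1).reverse ++ (PySem.List.pyRange 0 (P : Int) 1).reverse := by
        rw [show dgs + 1 - 1 = dgs by ring]
        rw [PySem.List.pyRange_neg_one_eq_reverse]
        rw [show (-1 : Int) + 1 = 0 by ring]
        rw [PySem.List.pyRange_one_append 0 (P : Int) (dgs + 1) (by positivity) (by omega)]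
        rw [List.reverse_append]
      rw [hr1, List.foldl_append]
      rw [foldl_skip (P : Int) _ (by
        intro i hi
        rw [List.mem_reverse] at hi
        have := (PySem.List.mem_pyRange_one.mp hi).1
        omega) (0, -1)]
      have hr2 : (PySem.List.pyRange 0 (P : Int) 1).reverse
          = PySem.List.pyRange ((P : Int) - 1) (-1) (-1) := by
        rw [PySem.List.pyRange_neg_one_eq_reverse]
        rw [show (-1 : Int) + 1 = 0 by ring, show (P : Int) - 1 + 1 = (P : Int) by ring]
      rw [hr2]
      rw [foldl_run _ (P : Int) P le_rfl 0 (-1)]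
      simp
    obtain ⟨h0, h1⟩ := Tsum_spec zs ws dgs hdgs hbz hbw hPle hLle P le_rfl
    rw [show (P : Int) - 1 - (P : Nat) = -1 by ring] at h0 h1
    rw [hval]
    refine ⟨h0, ?_⟩
    have hsv : ∑ t ∈ Finset.range P, zs.getD (P - P + t) 0 * 10 ^ (P - P + t) = sumVal zs := by
      rw [sumVal]
      apply Finset.sum_congr rfl
      intro t _
      rw [show P - P + t = t by omega]
    rw [hsv] at h1
    have hz : sumVal zs = n % 10 ^ dgs.toNat := digitsNum_sumVal dgs.toNat n hn
    have hw : sumVal ws = m % 10 ^ dgs.toNat := digitsNum_sumVal dgs.toNat m hm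
    rw [hz, hw] at h1
    refine h1.trans ?_
    exact Int.ModEq.mul (Int.emod_emod_of_dvd n dvd_rfl) (Int.emod_emod_of_dvd m dvd_rfl)
  · have hval : multiplyTwoNumbers n m dgs = 0 := by
      rw [multiplyTwoNumbers_as_fold]
      rw [PySem.List.pyRange_neg_one_eq_nil (by omega)]
      rfl
    rw [hval]
    have hD : dgs.toNat = 0 := by omega
    rw [hD]
    exact ⟨le_rfl, by simp [Int.ModEq]⟩

theorem rmLoop_spec (nn digits : Int) (hn : 0 ≤ nn) (f : Nat) : ∀ b : Int, 0 ≤ b →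
    0 ≤ rmLoop nn digits f b ∧ rmLoop nn digits f b ≡ nn ^ f * b [ZMOD (10 : Int) ^ digits.toNat] := by
  induction f with
  | zero => intro b hb; exact ⟨hb, by simp [rmLoop, Int.ModEq.refl]⟩
  | succ f ih =>
    intro b hb
    obtain ⟨h0, h1⟩ := multiplyTwoNumbers_spec nn b digits hn hb
    obtain ⟨g0, g1⟩ := ih _ h0
    refine ⟨g0, ?_⟩
    calc rmLoop nn digits (f + 1) b = rmLoop nn digits f (multiplyTwoNumbers nn b digits) := rfl
      _ ≡ nn ^ f * (multiplyTwoNumbers nn b digits) [ZMOD _] := g1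
      _ ≡ nn ^ f * (nn * b) [ZMOD _] := h1.mul_left _
      _ = nn ^ (f + 1) * b := by ring

theorem runMultiplyNTimes_spec (n digits : Int) (hn : 1 ≤ n) :
    runMultiplyNTimes n digits = n ^ n.toNat % 10 ^ digits.toNat := by
  obtain ⟨h0, h1⟩ := rmLoop_spec n digits (by omega) (n - 1).toNat n (by omega)
  show (PySem.List.pyRange 0 (((relIntToStr (rmLoop n digits (n - 1).toNat n) digits).reverse.length : Nat) : Int) 1).foldl
      (fun acc i => acc + ((PySem.Int.ofStr? (PySem.List.pyGetD (relIntToStr (rmLoop n digits (n - 1).toNat n) digits).reverse i "")).getD 0) * 10 ^ i.toNat) 0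
    = n ^ n.toNat % 10 ^ digits.toNat
  rw [recon_eq _ digits h0]
  have hpow : n ^ (n - 1).toNat * n = n ^ n.toNat := by
    rw [← pow_succ]
    congr 1
    omega
  rw [hpow] at h1
  exact h1

theorem powLoop_spec (m : Int) (hm : 1 < m) (f : Nat) : ∀ result base e : Int,
    0 ≤ result → result < m → 0 ≤ base → e ≤ (f : Int) →
    powLoop m f result base e = result * base ^ e.toNat % m := by
  have hm2 : ∀ a : Int, PySem.Int.mod a 2 = a % 2 := fun a => PySem.Int.mod_eq_emod_of_pos (by norm_num)
  have hmm : ∀ a : Int, PySem.Int.mod a m = a % m := fun a => PySem.Int.mod_eq_emod_of_pos (by omega)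
  have hd2 : ∀ a : Int, PySem.Int.floordiv a 2 = a / 2 := fun a => PySem.Int.floordiv_eq_ediv_of_pos (by norm_num)
  induction f with
  | zero =>
    intro r b e hr0 hr1 _ he
    have : e.toNat = 0 := by omega
    rw [this, pow_zero, mul_one]
    exact (Int.emod_eq_of_lt hr0 hr1).symm
  | succ f ih =>
    intro r b e hr0 hr1 hb he
    simp only [powLoop, hm2, hmm, hd2]
    by_cases hepos : e > 0
    · rw [if_pos hepos]
      have hr'0 : 0 ≤ if e % 2 = 1 then r * b % m else r := by
        split
        · exact Int.emod_nonneg _ (by omega)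
        · exact hr0
      have hr'1 : (if e % 2 = 1 then r * b % m else r) < m := by
        split
        · exact Int.emod_lt_of_pos _ (by omega)
        · exact hr1
      rw [ih _ _ _ hr'0 hr'1 (Int.emod_nonneg _ (by omega)) (by omega)]
      have hbb : (b * b % m : Int) ≡ b * b [ZMOD m] := Int.emod_emod_of_dvd _ dvd_rfl
      have hEe : e.toNat = 2 * (e / 2).toNat + (e % 2).toNat := by omega
      rcases Int.emod_two_eq e with h2 | h2
      · rw [if_neg (by rw [h2]; norm_num)]
        show r * (b * b % m) ^ (e / 2).toNat % m = r * b ^ e.toNat % m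
        have : (r * (b * b % m) ^ (e / 2).toNat : Int) ≡ r * b ^ e.toNat [ZMOD m] := by
          calc (r * (b * b % m) ^ (e / 2).toNat : Int)
              ≡ r * (b * b) ^ (e / 2).toNat [ZMOD m] := (hbb.pow _).mul_left r
            _ = r * b ^ e.toNat := by
                rw [hEe, h2]
                simp [pow_mul, mul_pow, sq]
        exact this
      · rw [if_pos (by rw [h2])]
        show (r * b % m) * (b * b % m) ^ (e / 2).toNat % m = r * b ^ e.toNat % m
        have hrb : (r * b % m : Int) ≡ r * b [ZMOD m] := Int.emod_emod_of_dvd _ dvd_rfl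
        have : ((r * b % m) * (b * b % m) ^ (e / 2).toNat : Int) ≡ r * b ^ e.toNat [ZMOD m] := by
          calc ((r * b % m) * (b * b % m) ^ (e / 2).toNat : Int)
              ≡ (r * b) * (b * b) ^ (e / 2).toNat [ZMOD m] := hrb.mul (hbb.pow _)
            _ = r * b ^ e.toNat := by
                rw [hEe, h2]
                simp [pow_mul, pow_add, mul_pow, sq]
                ring_nf
        exact this
    · rw [if_neg hepos]
      have : e.toNat = 0 := by omega
      rw [this, pow_zero, mul_one]
      exact (Int.emod_eq_of_lt hr0 hr1).symm

theorem sum_of_self_powers_eq (number digits : Int) :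
    sum_of_self_powers number digits =
      ((PySem.List.pyRange 1 (number + 1) 1).foldl
        (fun tot n => tot + n ^ n.toNat % 10 ^ digits.toNat) 0) % 10 ^ digits.toNat := by
  have hbody : (PySem.List.pyRange 1 (number + 1) 1).foldl
        (fun tot n => tot + runMultiplyNTimes n digits) 0
      = (PySem.List.pyRange 1 (number + 1) 1).foldl
        (fun tot n => tot + n ^ n.toNat % 10 ^ digits.toNat) 0 :=
    PySem.List.foldl_congr_mem _ _ _ 0 (fun acc n hn => by
      rw [runMultiplyNTimes_spec n digits (PySem.List.mem_pyRange_one.mp hn).1])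
  have htot : 0 ≤ (PySem.List.pyRange 1 (number + 1) 1).foldl
      (fun tot n => tot + n ^ n.toNat % 10 ^ digits.toNat) 0 := by
    rw [PySem.List.foldl_add]
    refine le_trans (by norm_num) (le_add_of_nonneg_right (List.sum_nonneg ?_))
    intro x hx
    simp only [List.mem_map] at hx
    obtain ⟨n, _, rfl⟩ := hx
    exact Int.emod_nonneg _ (by positivity)
  show (PySem.List.pyRange 0 ((((relIntToStr ((PySem.List.pyRange 1 (number + 1) 1).foldl
        (fun tot n => tot + runMultiplyNTimes n digits) 0) digits).reverse.length : Nat)) : Int) 1).foldl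
      (fun acc i => acc + ((PySem.Int.ofStr? (PySem.List.pyGetD (relIntToStr ((PySem.List.pyRange 1 (number + 1) 1).foldl
        (fun tot n => tot + runMultiplyNTimes n digits) 0) digits).reverse i "")).getD 0) * 10 ^ i.toNat) 0 = _
  rw [hbody]
  rw [recon_eq _ digits htot]

theorem alt_eq (number digits : Int) (hd : ¬ digits ≤ 0) :
    sum_of_self_powers_alt number digits =
      ((PySem.List.pyRange 1 (number + 1) 1).foldl
        (fun tot n => tot + n ^ n.toNat % 10 ^ digits.toNat) 0) % 10 ^ digits.toNat := by
  have hm : (1 : Int) < 10 ^ digits.toNat := by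
    apply one_lt_pow₀ (by norm_num)
    omega
  rw [sum_of_self_powers_alt, if_neg hd]
  have hbody : (PySem.List.pyRange 1 (number + 1) 1).foldl
        (fun total n => total + powLoop ((10 : Int) ^ digits.toNat) n.toNat 1
          (PySem.Int.mod n ((10 : Int) ^ digits.toNat)) n) 0
      = (PySem.List.pyRange 1 (number + 1) 1).foldl
        (fun tot n => tot + n ^ n.toNat % 10 ^ digits.toNat) 0 :=
    PySem.List.foldl_congr_mem _ _ _ 0 (fun acc n hn => by
      have h1 : 1 ≤ n := (PySem.List.mem_pyRange_one.mp hn).1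
      rw [PySem.Int.mod_eq_emod_of_pos (by positivity)]
      rw [powLoop_spec ((10 : Int) ^ digits.toNat) hm n.toNat (1 : Int) (n % 10 ^ digits.toNat) n
        (by norm_num) hm (Int.emod_nonneg _ (by positivity)) (by omega)]
      rw [one_mul]
      congr 1
      have hmodn : (n % 10 ^ digits.toNat : Int) ≡ n [ZMOD 10 ^ digits.toNat] :=
        Int.emod_emod_of_dvd n dvd_rfl
      exact hmodn.pow n.toNat)
  show PySem.Int.mod ((PySem.List.pyRange 1 (number + 1) 1).foldl
        (fun total n => total + powLoop ((10 : Int) ^ digits.toNat) n.toNat 1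
          (PySem.Int.mod n ((10 : Int) ^ digits.toNat)) n) 0) ((10 : Int) ^ digits.toNat) = _
  rw [hbody, PySem.Int.mod_eq_emod_of_pos (by positivity)]

-- ===== VERDICT (by name: the statement is the Claim_ definition above) =====
theorem sum_of_self_powers_spec : Claim_equal_sum_of_self_powers := by
  intro number digits _
  unfold Spec_sum_of_self_powers
  by_cases hd : digits ≤ 0
  · have h0 : digits.toNat = 0 := Int.toNat_of_nonpos hd
    rw [sum_of_self_powers_eq, h0]
    simp [sum_of_self_powers_alt, hd]
  · rw [sum_of_self_powers_eq, alt_eq number digits hd]
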